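-- pv_equiv track=rewrite | github.com/haoxiang-xu/PuPu | unchain_runtime/server/memory_factory.py | _collapse_consecutive_assistant_messages
-- ===== SOURCE A (Python) =====
-- from typing import Any, Callable
--
-- def _collapse_consecutive_assistant_messages(
--     messages: list[dict[str, Any]],
-- ) -> list[dict[str, Any]]:
--     collapsed: list[dict[str, Any]] = []
--
--     for message in messages:
--         if (
--             message.get("role") == "assistant"
--             and collapsed
--             and collapsed[-1].get("role") == "assistant"
--         ):
--             collapsed[-1] = message
--             continue
--         collapsed.append(message)
--
--     return collapsed
-- ===== SOURCE B (Python) =====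
-- def _collapse_consecutive_assistant_messages(messages):
--     # Keep a message unless it is an assistant message immediately followed by
--     # another assistant message (i.e. keep only the last of each assistant run).
--     result = []
--     for m, nxt in zip(messages, messages[1:]):
--         if not (m.get("role") == "assistant" and nxt.get("role") == "assistant"):
--             result.append(m)
--     if messages:
--         result.append(messages[-1])
--     return result
-- ===== Notes on version B (the rewrite author's own statement) =====
-- stated objective: simpler
-- what changed: A builds the result by overwriting its last appended element whenever two assistant messages are adjacent; B instead does a single lookahead filter over (message, next) pairs, keeping each message unless it is an assistant immediately followed by another assistant, then appends the final message.
import Mathlib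
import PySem

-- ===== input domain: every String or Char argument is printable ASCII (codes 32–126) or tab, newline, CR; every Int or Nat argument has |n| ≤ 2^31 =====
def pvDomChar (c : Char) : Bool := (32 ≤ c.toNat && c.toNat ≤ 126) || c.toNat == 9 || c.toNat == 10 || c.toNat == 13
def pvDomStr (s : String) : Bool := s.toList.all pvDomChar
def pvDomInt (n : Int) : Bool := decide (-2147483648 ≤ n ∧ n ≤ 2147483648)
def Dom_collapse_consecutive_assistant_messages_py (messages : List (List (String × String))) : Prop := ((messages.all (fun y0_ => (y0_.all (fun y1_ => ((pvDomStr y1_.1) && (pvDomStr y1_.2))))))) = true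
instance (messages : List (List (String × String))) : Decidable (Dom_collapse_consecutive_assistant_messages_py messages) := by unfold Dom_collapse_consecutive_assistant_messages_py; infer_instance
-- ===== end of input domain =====

-- B replaces A's overwrite-the-last-appended-element loop by a lookahead filter over
-- adjacent pairs (simpler; same O(n) cost).

-- shared helper: message.get("role") on an association-list dict = first match
def pvRole (m : List (String × String)) : Option String := m.lookup "role"

-- ===== PORT A =====
-- the 'for message in messages' loop of A, with 'collapsed' as accumulator;
-- 'collapsed[-1].get("role")' is getLast? (exact: guarded by 'collapsed' being nonempty),
-- 'collapsed[-1] = message' is dropLast ++ [message]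
def pvALoop (collapsed : List (List (String × String))) :
    List (List (String × String)) → List (List (String × String))
  | [] => collapsed
  | m :: rest =>
    if pvRole m == some "assistant" && !collapsed.isEmpty &&
       (collapsed.getLast?.map (fun l => pvRole l == some "assistant")).getD false
    then pvALoop (collapsed.dropLast ++ [m]) rest
    else pvALoop (collapsed ++ [m]) rest

def collapse_consecutive_assistant_messages_py (messages : List (List (String × String))) :
    List (List (String × String)) :=
  pvALoop [] messages

-- ===== PORT B =====
-- zip(messages, messages[1:]) lookahead filter, then 'if messages: result.append(messages[-1])'
def collapse_consecutive_assistant_messages_py_alt (messages : List (List (String × String))) :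
    List (List (String × String)) :=
  let result := (messages.zip (PySem.List.slice messages (some 1) none)).foldl
    (fun res p =>
      if !(pvRole p.1 == some "assistant" && pvRole p.2 == some "assistant")
      then res ++ [p.1] else res) []
  match messages.getLast? with
  | some l => result ++ [l]
  | none => result

-- ===== PRECONDITION & SPEC =====
def Spec_collapse_consecutive_assistant_messages_py (messages : List (List (String × String))) (out : List (List (String × String))) : Prop := out = collapse_consecutive_assistant_messages_py_alt messages
instance (messages : List (List (String × String))) (out : List (List (String × String))) : Decidable (Spec_collapse_consecutive_assistant_messages_py messages out) := by unfold Spec_collapse_consecutive_assistant_messages_py; infer_instance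

-- ===== CLAIM (what is proved, stated in full; the proofs are below) =====
def Claim_equal_collapse_consecutive_assistant_messages_py : Prop := ∀ (messages : List (List (String × String))), Dom_collapse_consecutive_assistant_messages_py messages → Spec_collapse_consecutive_assistant_messages_py messages (collapse_consecutive_assistant_messages_py messages)

-- ===== LEMMAS AND PROOFS =====

-- the common specification: drop an assistant message when the next one is also assistant
def pvSpec : List (List (String × String)) → List (List (String × String))
  | [] => []
  | [m] => [m]
  | m1 :: m2 :: t =>
    if pvRole m1 == some "assistant" && pvRole m2 == some "assistant"
    then pvSpec (m2 :: t) else m1 :: pvSpec (m2 :: t)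

theorem pvALoop_concat (ms : List (List (String × String))) :
    ∀ (c : List (List (String × String))) (l : List (String × String)),
    pvALoop (c ++ [l]) ms = c ++ pvSpec (l :: ms) := by
  induction ms with
  | nil => intro c l; simp [pvALoop, pvSpec]
  | cons m rest ih =>
    intro c l
    have hne : (c ++ [l]).isEmpty = false := by simp
    simp only [pvALoop, hne, Bool.not_false, Bool.and_true, List.getLast?_concat,
      Option.map_some, Option.getD_some, List.dropLast_concat, pvSpec]
    by_cases hm : (pvRole m == some "assistant") = true <;>
      by_cases hl : (pvRole l == some "assistant") = true
    · simp [hm, hl, ih c m]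
    · simp only [hm, hl, Bool.and_false, Bool.false_and, if_false, Bool.false_eq_true]
      simpa using ih (c ++ [l]) m
    · simp only [hm, hl, Bool.and_true, if_false, Bool.false_eq_true]
      simpa using ih (c ++ [l]) m
    · simp only [hm, hl, Bool.and_false, if_false, Bool.false_eq_true]
      simpa using ih (c ++ [l]) m

def pvLastList (ms : List (List (String × String))) : List (List (String × String)) :=
  match ms.getLast? with
  | some l => [l]
  | none => []

theorem pvB_core (ms : List (List (String × String))) :
    ∀ acc : List (List (String × String)),
    ((ms.zip ms.tail).foldl
      (fun res p =>
        if !(pvRole p.1 == some "assistant" && pvRole p.2 == some "assistant")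
        then res ++ [p.1] else res) acc) ++ pvLastList ms = acc ++ pvSpec ms := by
  induction ms using pvSpec.induct with
  | case1 => intro acc; simp [pvSpec, pvLastList]
  | case2 m => intro acc; simp [pvSpec, pvLastList]
  | case3 m1 m2 t h ih =>
    intro acc
    simp only [List.tail_cons, List.zip_cons_cons, List.foldl_cons, pvSpec, h, if_pos,
      Bool.not_true, Bool.false_eq_true, if_false]
    have hlast : pvLastList (m1 :: m2 :: t) = pvLastList (m2 :: t) := by
      simp [pvLastList, List.getLast?_cons_cons]
    rw [hlast]
    simpa [h] using ih acc
  | case4 m1 m2 t h ih =>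
    intro acc
    simp only [List.tail_cons, List.zip_cons_cons, List.foldl_cons, pvSpec, h]
    have hlast : pvLastList (m1 :: m2 :: t) = pvLastList (m2 :: t) := by
      simp [pvLastList, List.getLast?_cons_cons]
    rw [hlast]
    simp only [Bool.not_eq_true' ] at *
    simpa [h] using ih (acc ++ [m1])

theorem pvB_eq_spec (ms : List (List (String × String))) :
    collapse_consecutive_assistant_messages_py_alt ms = pvSpec ms := by
  have h := pvB_core ms []
  simp only [List.nil_append] at h
  unfold collapse_consecutive_assistant_messages_py_alt
  rw [PySem.List.slice_from_one]
  cases hh : ms.getLast? with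
  | none => simpa [pvLastList, hh] using h
  | some l => simpa [pvLastList, hh] using h

theorem pvA_eq_spec (ms : List (List (String × String))) :
    collapse_consecutive_assistant_messages_py ms = pvSpec ms := by
  unfold collapse_consecutive_assistant_messages_py
  cases ms with
  | nil => simp [pvALoop, pvSpec]
  | cons m rest =>
    have h0 : pvALoop [] (m :: rest) = pvALoop [m] rest := by
      simp [pvALoop]
    rw [h0]
    simpa using pvALoop_concat rest [] m

-- ===== VERDICT (by name: the statement is the Claim_ definition above) =====
theorem collapse_consecutive_assistant_messages_py_spec : Claim_equal_collapse_consecutive_assistant_messages_py := by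
  intro messages _
  unfold Spec_collapse_consecutive_assistant_messages_py
  rw [pvA_eq_spec, pvB_eq_spec]
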